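-- pv_equiv track=rewrite | github.com/HuihanCui/COMP0009 | tableau.py | contradiction_fol
-- ===== SOURCE A (Python) =====
-- def is_literal_fol(fmla):
--     return len(fmla) == 6 or len(fmla) == 7
--
-- def contradiction_fol(fmlas):
--     positives = []
--     negatives = []
--     for fmla in fmlas:
--         if is_literal_fol(fmla):
--             if len(fmla) == 6 and not fmla in negatives:
--                 positives.append(fmla)
--             elif len(fmla) == 7 and not fmla[1:] in positives:
--                 negatives.append(fmla[1:])
--             else:
--                 return False
--     return True
-- ===== SOURCE B (Python) =====
-- def contradiction_fol(fmlas):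
--     positives = set()
--     negatives = set()
--     for fmla in fmlas:
--         if len(fmla) == 6:
--             positives.add(fmla)
--         elif len(fmla) == 7:
--             negatives.add(fmla[1:])
--     return positives.isdisjoint(negatives)
-- ===== Notes on version B (the rewrite author's own statement) =====
-- stated objective: simpler
-- what changed: B classifies every formula into a positives/negatives set in one unconditional pass and decides contradiction by a single final set-disjointness test, instead of A's incremental membership checks with in-loop contradiction branches and an early return.
import Mathlib
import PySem

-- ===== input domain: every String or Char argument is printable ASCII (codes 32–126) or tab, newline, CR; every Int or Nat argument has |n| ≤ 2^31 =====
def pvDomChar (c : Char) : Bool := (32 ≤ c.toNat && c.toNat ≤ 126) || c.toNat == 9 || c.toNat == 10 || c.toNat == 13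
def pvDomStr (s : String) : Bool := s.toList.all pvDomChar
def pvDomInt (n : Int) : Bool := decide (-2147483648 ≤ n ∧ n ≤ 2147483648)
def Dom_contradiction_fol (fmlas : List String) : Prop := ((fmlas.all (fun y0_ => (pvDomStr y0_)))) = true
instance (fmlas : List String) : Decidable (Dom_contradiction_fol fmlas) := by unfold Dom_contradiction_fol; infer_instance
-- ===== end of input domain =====

-- B replaces A's in-loop contradiction checks and early return by one classifying pass
-- into two sets followed by a single final disjointness test (objective: simpler).


-- ===== PORT A =====
def is_literal_fol (fmla : String) : Bool :=
  PySem.Str.len fmla == 6 || PySem.Str.len fmla == 7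

def contradictionFolLoop (fmlas positives negatives : List String) : Bool :=
  match fmlas with
  | [] => true
  | fmla :: rest =>
    if is_literal_fol fmla then
      if PySem.Str.len fmla == 6 && !(negatives.contains fmla) then
        contradictionFolLoop rest (positives ++ [fmla]) negatives
      else if PySem.Str.len fmla == 7 && !(positives.contains (PySem.Str.slice fmla (some 1) none)) then
        contradictionFolLoop rest positives (negatives ++ [PySem.Str.slice fmla (some 1) none])
      else false
    else
      contradictionFolLoop rest positives negatives

def contradiction_fol (fmlas : List String) : Bool :=
  contradictionFolLoop fmlas [] []

-- ===== PORT B =====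
def contradictionFolStep (pn : PySem.Set String × PySem.Set String) (fmla : String) :
    PySem.Set String × PySem.Set String :=
  if PySem.Str.len fmla == 6 then (PySem.Set.add pn.1 fmla, pn.2)
  else if PySem.Str.len fmla == 7 then (pn.1, PySem.Set.add pn.2 (PySem.Str.slice fmla (some 1) none))
  else pn

def contradiction_fol_alt (fmlas : List String) : Bool :=
  let pn := fmlas.foldl contradictionFolStep (PySem.Set.empty, PySem.Set.empty)
  PySem.Set.isdisjoint pn.1 pn.2

-- ===== PRECONDITION & SPEC =====
def Spec_contradiction_fol (fmlas : List String) (out : Bool) : Prop := out = contradiction_fol_alt fmlas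
instance (fmlas : List String) (out : Bool) : Decidable (Spec_contradiction_fol fmlas out) := by unfold Spec_contradiction_fol; infer_instance

-- ===== CLAIM (what is proved, stated in full; the proofs are below) =====
def Claim_equal_contradiction_fol : Prop := ∀ (fmlas : List String), Dom_contradiction_fol fmlas → Spec_contradiction_fol fmlas (contradiction_fol fmlas)

-- ===== LEMMAS AND PROOFS =====

-- the positive literals, and the bodies of the negative literals, of a list of formulas
def posOf (fmlas : List String) : List String :=
  fmlas.filter (fun f => PySem.Str.len f == 6)

def negOf (fmlas : List String) : List String :=
  (fmlas.filter (fun f => PySem.Str.len f == 7)).map (fun f => PySem.Str.slice f (some 1) none)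

theorem posOf_six {f : String} {rest : List String} (h : f.length = 6) :
    posOf (f :: rest) = f :: posOf rest := by
  simp [posOf, h]

theorem posOf_ne {f : String} {rest : List String} (h : ¬ f.length = 6) :
    posOf (f :: rest) = posOf rest := by
  have e6 : ¬ ((f.length : Int) = 6) := by exact_mod_cast h
  simp [posOf, e6]

theorem negOf_seven {f : String} {rest : List String} (h : f.length = 7) :
    negOf (f :: rest) = PySem.Str.slice f (some 1) none :: negOf rest := by
  simp [negOf, h]

theorem negOf_ne {f : String} {rest : List String} (h : ¬ f.length = 7) :
    negOf (f :: rest) = negOf rest := by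
  have e7 : ¬ ((f.length : Int) = 7) := by exact_mod_cast h
  simp [negOf, e7]

theorem forall_mem_congr {l1 l2 m1 m2 : List String}
    (hl : ∀ x, x ∈ l1 ↔ x ∈ l2) (hm : ∀ x, x ∈ m1 ↔ x ∈ m2) :
    (∀ x ∈ l1, x ∉ m1) ↔ (∀ x ∈ l2, x ∉ m2) := by
  constructor
  · intro h x hx hm'
    exact h x ((hl x).mpr hx) ((hm x).mpr hm')
  · intro h x hx hm'
    exact h x ((hl x).mp hx) ((hm x).mp hm')

theorem loop_iff (fmlas : List String) : ∀ (ps ns : List String),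
    (∀ x ∈ ps, x ∉ ns) →
    (contradictionFolLoop fmlas ps ns = true ↔
      ∀ x ∈ ps ++ posOf fmlas, x ∉ ns ++ negOf fmlas) := by
  induction fmlas with
  | nil =>
    intro ps ns h
    simp only [contradictionFolLoop, posOf, negOf, List.filter_nil, List.map_nil,
      List.append_nil]
    exact iff_of_true trivial h
  | cons f rest ih =>
    intro ps ns h
    by_cases h6 : f.length = 6
    · have hl : is_literal_fol f = true := by simp [is_literal_fol, h6]
      have h7 : ¬ f.length = 7 := by omega
      by_cases hc : f ∈ ns
      · have heq : contradictionFolLoop (f :: rest) ps ns = false := by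
          simp [contradictionFolLoop, hl, h6, hc]
        rw [heq]
        refine iff_of_false (by simp) ?_
        intro hall
        refine hall f ?_ (List.mem_append_left _ hc)
        rw [posOf_six h6]
        exact List.mem_append_right _ (List.mem_cons_self ..)
      · have heq : contradictionFolLoop (f :: rest) ps ns =
            contradictionFolLoop rest (ps ++ [f]) ns := by
          simp [contradictionFolLoop, hl, h6, hc]
        have h' : ∀ x ∈ ps ++ [f], x ∉ ns := by
          intro x hx
          rcases List.mem_append.mp hx with hx | hx
          · exact h x hx
          · rw [List.mem_singleton.mp hx]; exact hc
        rw [heq, ih (ps ++ [f]) ns h', posOf_six h6, negOf_ne h7]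
        refine forall_mem_congr (fun x => ?_) (fun x => Iff.rfl)
        simp only [List.mem_append, List.mem_cons]
        tauto
    · by_cases h7 : f.length = 7
      · have hl : is_literal_fol f = true := by simp [is_literal_fol, h7]
        by_cases hc : PySem.Str.slice f (some 1) none ∈ ps
        · have heq : contradictionFolLoop (f :: rest) ps ns = false := by
            simp [contradictionFolLoop, hl, h7, hc]
          rw [heq]
          refine iff_of_false (by simp) ?_
          intro hall
          refine hall _ (List.mem_append_left _ hc) ?_
          rw [negOf_seven h7]
          exact List.mem_append_right _ (List.mem_cons_self ..)
        · have heq : contradictionFolLoop (f :: rest) ps ns =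
              contradictionFolLoop rest ps (ns ++ [PySem.Str.slice f (some 1) none]) := by
            simp [contradictionFolLoop, hl, h7, hc]
          have h' : ∀ x ∈ ps, x ∉ ns ++ [PySem.Str.slice f (some 1) none] := by
            intro x hx hmem
            rcases List.mem_append.mp hmem with hm | hm
            · exact h x hx hm
            · rw [List.mem_singleton.mp hm] at hx; exact hc hx
          rw [heq, ih ps _ h', posOf_ne h6, negOf_seven h7]
          refine forall_mem_congr (fun x => Iff.rfl) (fun x => ?_)
          simp only [List.mem_append, List.mem_cons]
          tauto
      · have e6 : ¬ ((f.length : Int) = 6) := by exact_mod_cast h6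
        have e7 : ¬ ((f.length : Int) = 7) := by exact_mod_cast h7
        have hl : is_literal_fol f = false := by simp [is_literal_fol, e6, e7]
        have heq : contradictionFolLoop (f :: rest) ps ns =
            contradictionFolLoop rest ps ns := by
          simp [contradictionFolLoop, hl]
        rw [heq, ih ps ns h, posOf_ne h6, negOf_ne h7]

theorem fold_mem (fmlas : List String) : ∀ (s1 s2 : PySem.Set String),
    (∀ x, x ∈ (fmlas.foldl contradictionFolStep (s1, s2)).1 ↔ x ∈ s1 ∨ x ∈ posOf fmlas) ∧
    (∀ x, x ∈ (fmlas.foldl contradictionFolStep (s1, s2)).2 ↔ x ∈ s2 ∨ x ∈ negOf fmlas) := by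
  induction fmlas with
  | nil =>
    intro s1 s2
    simp [posOf, negOf]
  | cons f rest ih =>
    intro s1 s2
    rw [List.foldl_cons]
    by_cases h6 : f.length = 6
    · have h7 : ¬ f.length = 7 := by omega
      have hstep : contradictionFolStep (s1, s2) f = (PySem.Set.add s1 f, s2) := by
        simp [contradictionFolStep, h6]
      rw [hstep]
      obtain ⟨ih1, ih2⟩ := ih (PySem.Set.add s1 f) s2
      refine ⟨fun x => ?_, fun x => ?_⟩
      · rw [ih1 x, posOf_six h6]
        simp only [PySem.Set.mem_add, List.mem_cons]
        tauto
      · rw [ih2 x, negOf_ne h7]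
    · by_cases h7 : f.length = 7
      · have hstep : contradictionFolStep (s1, s2) f =
            (s1, PySem.Set.add s2 (PySem.Str.slice f (some 1) none)) := by
          simp [contradictionFolStep, h7]
        rw [hstep]
        obtain ⟨ih1, ih2⟩ := ih s1 (PySem.Set.add s2 (PySem.Str.slice f (some 1) none))
        refine ⟨fun x => ?_, fun x => ?_⟩
        · rw [ih1 x, posOf_ne h6]
        · rw [ih2 x, negOf_seven h7]
          simp only [PySem.Set.mem_add, List.mem_cons]
          tauto
      · have e6 : ¬ ((f.length : Int) = 6) := by exact_mod_cast h6
        have e7 : ¬ ((f.length : Int) = 7) := by exact_mod_cast h7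
        have hstep : contradictionFolStep (s1, s2) f = (s1, s2) := by
          simp [contradictionFolStep, e6, e7]
        rw [hstep]
        obtain ⟨ih1, ih2⟩ := ih s1 s2
        refine ⟨fun x => ?_, fun x => ?_⟩
        · rw [ih1 x, posOf_ne h6]
        · rw [ih2 x, negOf_ne h7]

theorem alt_iff (fmlas : List String) :
    contradiction_fol_alt fmlas = true ↔ ∀ x ∈ posOf fmlas, x ∉ negOf fmlas := by
  unfold contradiction_fol_alt
  obtain ⟨h1, h2⟩ := fold_mem fmlas PySem.Set.empty PySem.Set.empty
  simp only [PySem.Set.isdisjoint, Bool.not_eq_true', List.any_eq_false]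
  constructor
  · intro hdis x hxp hxn
    have := hdis x ((h1 x).mpr (Or.inr hxp))
    simp at this
    exact this ((h2 x).mpr (Or.inr hxn))
  · intro hdis x hx1
    by_contra hcon
    have hx2 : x ∈ (fmlas.foldl contradictionFolStep (PySem.Set.empty, PySem.Set.empty)).2 := by
      simpa using hcon
    rcases (h1 x).mp hx1 with hx | hx
    · simp [PySem.Set.empty] at hx
    · rcases (h2 x).mp hx2 with hy | hy
      · simp [PySem.Set.empty] at hy
      · exact hdis x hx hy

-- ===== VERDICT (by name: the statement is the Claim_ definition above) =====
theorem contradiction_fol_spec : Claim_equal_contradiction_fol := by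
  intro fmlas _
  unfold Spec_contradiction_fol contradiction_fol
  rw [Bool.eq_iff_iff, loop_iff fmlas [] [] (by simp), alt_iff]
  simp
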